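-- pv_equiv track=rewrite | github.com/tobiebenezer/portfolio | StreamingApp/env/quiz.py | categorize_hurricanes
-- ===== SOURCE A (Python) =====
-- def categorize_hurricanes(wind_speeds):
--     categories = []
--
--     for speed in wind_speeds:
--         if speed < 74:
--             categories.append("Not a hurricane")
--         elif 74 <= speed <= 95:
--             categories.append("Category 1")
--         elif 96 <= speed <= 110:
--             categories.append("Category 2")
--         elif 111 <= speed <= 129:
--             categories.append("Category 3")
--         elif 130 <= speed <= 156:
--             categories.append("Category 4")
--         else:
--             categories.append("Category 5")
--
--     return categories
-- ===== SOURCE B (Python) =====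
-- THRESHOLDS = (74, 96, 111, 130, 157)
-- LABELS = ("Not a hurricane", "Category 1", "Category 2", "Category 3",
--           "Category 4", "Category 5")
--
-- def categorize_hurricanes(wind_speeds):
--     # Integer speeds make the bands contiguous, so the category index is
--     # simply the rank of the speed among the lower thresholds.
--     return [LABELS[sum(t <= s for t in THRESHOLDS)] for s in wind_speeds]
-- ===== Notes on version B (the rewrite author's own statement) =====
-- stated objective: alternative
-- what changed: Replaces the six-way if/elif range ladder with an arithmetic rank computation: the label index is the count of band lower-thresholds that are <= the speed, used to index a label table (exact because integer speeds make the bands contiguous).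
import Mathlib
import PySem

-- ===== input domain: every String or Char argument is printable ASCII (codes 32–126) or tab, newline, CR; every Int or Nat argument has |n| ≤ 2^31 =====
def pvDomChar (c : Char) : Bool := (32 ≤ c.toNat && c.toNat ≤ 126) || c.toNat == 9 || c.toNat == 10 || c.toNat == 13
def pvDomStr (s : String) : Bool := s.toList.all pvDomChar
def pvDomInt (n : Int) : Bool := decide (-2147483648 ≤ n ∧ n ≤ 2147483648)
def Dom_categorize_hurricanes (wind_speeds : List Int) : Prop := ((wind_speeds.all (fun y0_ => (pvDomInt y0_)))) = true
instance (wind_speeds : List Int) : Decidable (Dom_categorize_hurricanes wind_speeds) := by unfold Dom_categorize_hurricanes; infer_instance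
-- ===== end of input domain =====

-- ===== PORT A =====
-- B replaces A's if/elif range ladder by an arithmetic rank into a label table
-- (count of lower thresholds ≤ speed), exact for integer speeds (objective: alternative).
def categorize_hurricanes (wind_speeds : List Int) : List String :=
  wind_speeds.foldl (fun categories speed =>
    if speed < 74 then categories ++ ["Not a hurricane"]
    else if 74 ≤ speed ∧ speed ≤ 95 then categories ++ ["Category 1"]
    else if 96 ≤ speed ∧ speed ≤ 110 then categories ++ ["Category 2"]
    else if 111 ≤ speed ∧ speed ≤ 129 then categories ++ ["Category 3"]
    else if 130 ≤ speed ∧ speed ≤ 156 then categories ++ ["Category 4"]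
    else categories ++ ["Category 5"]) []

-- ===== PORT B =====
def pvThresholds : List Int := [74, 96, 111, 130, 157]

def pvLabels : List String :=
  ["Not a hurricane", "Category 1", "Category 2", "Category 3",
   "Category 4", "Category 5"]

-- Source B's 'sum(t <= s for t in THRESHOLDS)'
def pvRank (s : Int) : Nat :=
  pvThresholds.foldl (fun a t => a + (if t ≤ s then 1 else 0)) 0

-- LABELS[rank]; the rank is at most 5, always in range
def categorize_hurricanes_alt (wind_speeds : List Int) : List String :=
  wind_speeds.map (fun s => pvLabels.getD (pvRank s) "")

-- ===== PRECONDITION & SPEC =====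
def Spec_categorize_hurricanes (wind_speeds : List Int) (out : List String) : Prop := out = categorize_hurricanes_alt wind_speeds
instance (wind_speeds : List Int) (out : List String) : Decidable (Spec_categorize_hurricanes wind_speeds out) := by unfold Spec_categorize_hurricanes; infer_instance

-- ===== CLAIM =====
def Claim_equal_categorize_hurricanes : Prop := ∀ (wind_speeds : List Int), Dom_categorize_hurricanes wind_speeds → Spec_categorize_hurricanes wind_speeds (categorize_hurricanes wind_speeds)

-- ===== LEMMAS AND PROOFS =====

theorem label_eq (s : Int) :
    (if s < 74 then "Not a hurricane"
     else if 74 ≤ s ∧ s ≤ 95 then "Category 1"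
     else if 96 ≤ s ∧ s ≤ 110 then "Category 2"
     else if 111 ≤ s ∧ s ≤ 129 then "Category 3"
     else if 130 ≤ s ∧ s ≤ 156 then "Category 4"
     else "Category 5") = pvLabels.getD (pvRank s) "" := by
  simp only [pvRank, pvThresholds, List.foldl]
  split_ifs <;> first | rfl | omega

theorem fold_eq (wind_speeds : List Int) (acc : List String) :
    wind_speeds.foldl (fun categories speed =>
      if speed < 74 then categories ++ ["Not a hurricane"]
      else if 74 ≤ speed ∧ speed ≤ 95 then categories ++ ["Category 1"]
      else if 96 ≤ speed ∧ speed ≤ 110 then categories ++ ["Category 2"]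
      else if 111 ≤ speed ∧ speed ≤ 129 then categories ++ ["Category 3"]
      else if 130 ≤ speed ∧ speed ≤ 156 then categories ++ ["Category 4"]
      else categories ++ ["Category 5"]) acc
      = acc ++ wind_speeds.map (fun s => pvLabels.getD (pvRank s) "") := by
  induction wind_speeds generalizing acc with
  | nil => simp
  | cons x xs ih =>
    simp only [List.foldl, List.map]
    rw [ih, ← label_eq x]
    split_ifs <;> simp

-- ===== VERDICT =====
theorem categorize_hurricanes_spec : Claim_equal_categorize_hurricanes := by
  intro ws _
  show _ = _
  simp [categorize_hurricanes, categorize_hurricanes_alt, fold_eq]
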